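-- pv_equiv track=rewrite | github.com/ysw2946/Algorithm | 프로그래머스/할인행사.py | solution
-- ===== SOURCE A (Python) =====
-- from collections import defaultdict
--
-- def solution(want, number, discount):
--     answer =0
--     product_dict = defaultdict(list)
--
--     for idx in range(len(want)):
--         product_dict[want[idx]] = number[idx]
--
--     for w in want:
--         if product_dict[w] > discount.count(w):
--             return 0
--
--     for i in range(len(discount)-9):
--         check = 0
--         day_list = discount[i:i+10]
--
--         for w in want:
--             if day_list.count(w) == product_dict[w]:
--                 continue
--             else:
--                 check -= 1
--
--         if check == 0:
--             answer += 1
--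
--     return answer
-- ===== SOURCE B (Python) =====
-- def _bump(cnt, need, matched, key, delta):
--     # change cnt[key] by delta, keeping matched = #{w : cnt[w] == need[w]}
--     if cnt[key] == need[key]:
--         matched -= 1
--     cnt[key] += delta
--     if cnt[key] == need[key]:
--         matched += 1
--     return matched
--
--
-- def solution(want, number, discount):
--     # Sliding-window frequency counter with a running count of matched products.
--     need = dict(zip(want, number))
--     cnt = dict.fromkeys(need, 0)
--     matched = sum(1 for w in need if need[w] == 0)
--     target = len(need)
--     answer = 0
--     for i, item in enumerate(discount):
--         if item in cnt:
--             matched = _bump(cnt, need, matched, item, 1)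
--         if i >= 10:
--             old = discount[i - 10]
--             if old in cnt:
--                 matched = _bump(cnt, need, matched, old, -1)
--         if i >= 9 and matched == target:
--             answer += 1
--     return answer
-- ===== Notes on version B (the rewrite author's own statement) =====
-- stated objective: faster
-- what changed: Replaced the per-window re-slicing and re-counting (discount[i:i+10].count(w) for every wanted product at every window) by a single left-to-right sliding-window frequency dict with a running count of matched products, updated in O(1) per day.
-- outside the precondition, e.g. on solution(['a'], [], ['a']): A raises IndexError, B returns 0
import Mathlib
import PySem

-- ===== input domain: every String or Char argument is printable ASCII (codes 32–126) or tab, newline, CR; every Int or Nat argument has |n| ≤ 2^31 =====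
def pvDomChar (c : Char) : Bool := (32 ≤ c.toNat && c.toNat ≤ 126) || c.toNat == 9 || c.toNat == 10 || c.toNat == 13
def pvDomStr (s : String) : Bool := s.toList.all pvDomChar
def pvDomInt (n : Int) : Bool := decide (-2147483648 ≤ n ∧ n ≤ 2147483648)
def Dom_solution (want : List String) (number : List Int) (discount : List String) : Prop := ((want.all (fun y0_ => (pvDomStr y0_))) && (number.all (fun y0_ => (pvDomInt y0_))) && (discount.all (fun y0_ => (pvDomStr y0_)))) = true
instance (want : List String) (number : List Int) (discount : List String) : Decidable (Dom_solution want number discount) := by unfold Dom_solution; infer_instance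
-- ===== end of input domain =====

-- B replaces A's per-window re-slice-and-recount by a single sliding-window frequency
-- dict with a running matched count (objective: faster). Return-value equivalence only.

-- ===== PORT A =====
def solution (want : List String) (number : List Int) (discount : List String) : Int :=
  let product_dict : PySem.Dict String Int :=
    (PySem.List.pyRange 0 (want.length : Int) 1).foldl
      (fun d idx =>
        match PySem.List.pyGet? want idx, PySem.List.pyGet? number idx with
        | some w, some n => d.insert w n
        | _, _ => d)   -- number[idx] out of range raises IndexError: excluded by Pre_solution
      PySem.Dict.empty
  if want.any (fun w => product_dict.getD w 0 > (discount.count w : Int)) then 0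
  else
    (PySem.List.pyRange 0 ((discount.length : Int) - 9) 1).foldl
      (fun answer i =>
        let day_list := PySem.List.slice discount (some i) (some (i + 10))
        let check : Int :=
          want.foldl
            (fun c w => if (day_list.count w : Int) = product_dict.getD w 0 then c else c - 1) 0
        if check = 0 then answer + 1 else answer)
      0

-- ===== PORT B =====
-- port of Source B's _bump: adjust cnt[key] by delta, keeping matched up to date
def bumpB (cnt need : PySem.Dict String Int) (matched : Int) (key : String) (delta : Int) :
    PySem.Dict String Int × Int :=
  let matched := if cnt.getD key 0 == need.getD key 0 then matched - 1 else matched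
  let cnt := cnt.modify key 0 (· + delta)
  let matched := if cnt.getD key 0 == need.getD key 0 then matched + 1 else matched
  (cnt, matched)

-- one iteration of Source B's main loop (state: cnt, matched, answer; p = (i, item))
def stepB (need : PySem.Dict String Int) (discount : List String)
    (st : PySem.Dict String Int × Int × Int) (p : Int × String) :
    PySem.Dict String Int × Int × Int :=
  let cm :=
    if st.1.contains p.2 then bumpB st.1 need st.2.1 p.2 1 else (st.1, st.2.1)
  let cm :=
    if 10 ≤ p.1 then
      let old := (PySem.List.pyGet? discount (p.1 - 10)).getD ""
      if cm.1.contains old then bumpB cm.1 need cm.2 old (-1) else cm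
    else cm
  let answer :=
    if 9 ≤ p.1 ∧ cm.2 = (need.keys.length : Int) then st.2.2 + 1 else st.2.2
  (cm.1, cm.2, answer)

def solution_alt (want : List String) (number : List Int) (discount : List String) : Int :=
  let need : PySem.Dict String Int :=
    (want.zip number).foldl (fun d p => d.insert p.1 p.2) PySem.Dict.empty
  let cnt0 : PySem.Dict String Int :=
    need.keys.foldl (fun d w => d.insert w (0 : Int)) PySem.Dict.empty
  let matched0 : Int := (need.keys.countP (fun w => need.getD w 0 == 0) : Int)
  let st := (PySem.List.enumerate discount).foldl (stepB need discount) (cnt0, matched0, 0)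
  st.2.2

-- ===== PRECONDITION & SPEC =====
-- Pre_ excludes exactly the inputs where A raises IndexError (number shorter than want).
def Pre_solution (want : List String) (number : List Int) (discount : List String) : Prop :=
  want.length ≤ number.length
instance (want : List String) (number : List Int) (discount : List String) : Decidable (Pre_solution want number discount) := by unfold Pre_solution; infer_instance

def pvWitness_solution : List String × List Int × List String :=
  (["a", "b"], [(1 : Int), 0], ["a", "a", "b", "a", "b", "c", "a", "b", "a", "b", "a"])

def Spec_solution (want : List String) (number : List Int) (discount : List String) (out : Int) : Prop := out = solution_alt want number discount
instance (want : List String) (number : List Int) (discount : List String) (out : Int) : Decidable (Spec_solution want number discount out) := by unfold Spec_solution; infer_instance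

-- ===== CLAIM (what is proved, stated in full; the proofs are below) =====
def Claim_equal_solution : Prop := ∀ (want : List String) (number : List Int) (discount : List String), Dom_solution want number discount → Pre_solution want number discount → Spec_solution want number discount (solution want number discount)

-- ===== LEMMAS AND PROOFS =====

-- count of w in the ≤10-day window of `l` ending just before position k
def wcnt (l : List String) (k : Nat) (w : String) : Nat :=
  ((l.take k).drop (k - 10)).count w

-- the last 10 days among the first m match `need` exactly
def winOK (need : PySem.Dict String Int) (l : List String) (m : Nat) : Bool :=
  need.keys.all (fun w => ((wcnt l m w : Int) == need.getD w 0))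

-- the common specification both programs are reduced to
def specCount (need : PySem.Dict String Int) (l : List String) : Int :=
  ((List.range l.length).countP (fun j => decide (9 ≤ j) && winOK need l (j + 1)) : Int)

-- loop invariant of Source B's main loop after k processed days
def InvB (need : PySem.Dict String Int) (l : List String) (k : Nat)
    (st : PySem.Dict String Int × Int × Int) : Prop :=
  st.1.keys = need.keys ∧
  (∀ w ∈ need.keys, st.1.getD w 0 = (wcnt l k w : Int)) ∧
  st.2.1 = (need.keys.countP (fun w => st.1.getD w 0 == need.getD w 0) : Int) ∧
  st.2.2 = ((List.range k).countP (fun j => decide (9 ≤ j) && winOK need l (j + 1)) : Int)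


lemma countP_delta {α : Type} (l : List α) (hl : l.Nodup) (p q : α → Bool) (x : α)
    (hx : x ∈ l) (hpq : ∀ y ∈ l, y ≠ x → p y = q y) :
    (l.countP q : Int) = l.countP p + (if q x then 1 else 0) - (if p x then 1 else 0) := by
  induction l with
  | nil => cases hx
  | cons a t ih =>
    rcases List.mem_cons.mp hx with rfl | hxt
    · have hcong : t.countP p = t.countP q := by
        apply List.countP_congr
        intro y hy
        rw [hpq y (List.mem_cons_of_mem _ hy) (fun h => (List.nodup_cons.mp hl).1 (h ▸ hy))]
      simp only [List.countP_cons, ← hcong]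
      split_ifs <;> push_cast <;> omega
    · have hax : a ≠ x := fun h => (List.nodup_cons.mp hl).1 (h ▸ hxt)
      have hpa : p a = q a := hpq a List.mem_cons_self hax
      have := ih (List.nodup_cons.mp hl).2 hxt
        (fun y hy hne => hpq y (List.mem_cons_of_mem _ hy) hne)
      simp only [List.countP_cons, hpa]
      split_ifs at this ⊢ <;> push_cast at this ⊢ <;> omega

lemma wcnt_succ_small (l : List String) (k : Nat) (x : String) (hk : l[k]? = some x)
    (h10 : k < 10) (w : String) :
    wcnt l (k + 1) w = wcnt l k w + (if w = x then 1 else 0) := by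
  unfold wcnt
  rw [Nat.sub_eq_zero_of_le (by omega), Nat.sub_eq_zero_of_le (by omega)]
  simp only [List.drop_zero, List.take_add_one, hk, Option.toList_some, List.count_append]
  rcases eq_or_ne w x with rfl | h
  · simp
  · simp [Ne.symm h, h]

lemma wcnt_succ_big (l : List String) (k : Nat) (x old : String) (hk : l[k]? = some x)
    (hold : l[k - 10]? = some old) (h10 : 10 ≤ k) (w : String) :
    wcnt l (k + 1) w + (if w = old then 1 else 0) = wcnt l k w + (if w = x then 1 else 0) := by
  have hlt : k < l.length := by
    by_contra h
    simp [List.getElem?_eq_none (by omega : l.length ≤ k)] at hk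
  unfold wcnt
  have hlen : (l.take k).length = k := by simp; omega
  have h1 : k + 1 - 10 = (k - 10) + 1 := by omega
  have hdk : (l.take k).drop (k - 10) = old :: (l.take k).drop (k - 10 + 1) := by
    rw [List.drop_eq_getElem_cons (by omega : k - 10 < (l.take k).length)]
    congr 1
    rw [List.getElem_take]
    have := List.getElem?_eq_getElem (l := l) (i := k - 10) (by omega)
    rw [this] at hold
    exact Option.some_injective _ hold
  rw [h1, List.take_add_one, hk, Option.toList_some,
    List.drop_append_of_le_length (by omega), List.count_append, hdk]
  have ifc : ∀ (a b : String) (m n : Nat), (if a = b then m else n) = (if b = a then m else n) := by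
    intro a b m n
    rcases eq_or_ne a b with rfl | h
    · simp
    · simp [h, h.symm]
  simp only [List.count_cons, List.count_nil, Nat.zero_add, beq_iff_eq]
  rw [ifc x w, ifc old w]
  omega

lemma wcnt_le_count (l : List String) (k : Nat) (w : String) : wcnt l k w ≤ l.count w := by
  have hs : ((l.take k).drop (k - 10)).Sublist l :=
    (((l.take k).drop_sublist _)).trans (l.take_sublist k)
  exact hs.count_le w

lemma bump_phase (need cnt : PySem.Dict String Int) (matched : Int) (x : String) (δ : Int)
    (hnd : need.keys.Nodup) (hkeys : cnt.keys = need.keys)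
    (hm : matched = (need.keys.countP (fun w => cnt.getD w 0 == need.getD w 0) : Int)) :
    (if cnt.contains x then bumpB cnt need matched x δ else (cnt, matched)).1.keys = need.keys ∧
    (∀ w ∈ need.keys,
      (if cnt.contains x then bumpB cnt need matched x δ else (cnt, matched)).1.getD w 0 =
        if w = x then cnt.getD w 0 + δ else cnt.getD w 0) ∧
    (if cnt.contains x then bumpB cnt need matched x δ else (cnt, matched)).2 =
      (need.keys.countP (fun w =>
        (if cnt.contains x then bumpB cnt need matched x δ else (cnt, matched)).1.getD w 0 ==
          need.getD w 0) : Int) := by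
  by_cases hc : cnt.contains x
  · have hxk : x ∈ need.keys := hkeys ▸ (PySem.Dict.contains_iff_mem_keys cnt x).mp hc
    simp only [hc, if_true, bumpB]
    have hgetD : ∀ w, (cnt.modify x 0 (· + δ)).getD w 0 =
        if w = x then cnt.getD x 0 + δ else cnt.getD w 0 := by
      intro w; exact PySem.Dict.getD_modify cnt x w 0 (· + δ)
    refine ⟨?_, ?_, ?_⟩
    · rw [PySem.Dict.keys_modify, PySem.Dict.keys_insert_of_contains _ _ hc, hkeys]
    · intro w _
      rcases eq_or_ne w x with rfl | h
      · simp [hgetD w]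
      · rw [hgetD w, if_neg h, if_neg h]
    · have hdelta := countP_delta need.keys hnd
        (fun w => cnt.getD w 0 == need.getD w 0)
        (fun w => (cnt.modify x 0 (· + δ)).getD w 0 == need.getD w 0) x hxk
        (by intro y _ hy; simp only [hgetD y, if_neg hy])
      simp only [hgetD x] at hdelta
      rw [hdelta, ← hm]
      simp only [hgetD x]
      split_ifs <;> omega
  · have hxk : x ∉ need.keys := fun h =>
      hc ((PySem.Dict.contains_iff_mem_keys cnt x).mpr (hkeys ▸ h))
    simp only [if_neg hc]
    refine ⟨hkeys, ?_, hm⟩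
    intro w hw
    rw [if_neg (fun h : w = x => hxk (h ▸ hw))]

lemma stepB_inv (need : PySem.Dict String Int) (l : List String) (hnd : need.keys.Nodup)
    (k : Nat) (x : String) (hk : l[k]? = some x)
    (st : PySem.Dict String Int × Int × Int) (h : InvB need l k st) :
    InvB need l (k + 1) (stepB need l st ((k : Int), x)) := by
  obtain ⟨cnt, matched, answer⟩ := st
  obtain ⟨hkeys, hcnt, hm, hans⟩ := h
  dsimp only at hkeys hcnt hm hans
  have hlt : k < l.length := by
    by_contra hcon
    simp [List.getElem?_eq_none (by omega : l.length ≤ k)] at hk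
  -- phase 1: add today's item
  obtain ⟨p1keys, p1get, p1m⟩ := bump_phase need cnt matched x 1 hnd hkeys hm
  set c1 := (if cnt.contains x then bumpB cnt need matched x 1 else (cnt, matched)) with hc1
  -- the combined (cnt, matched) after both phases, as stepB computes it
  set c2 := (if 10 ≤ (k : Int) then
      (let old := (PySem.List.pyGet? l ((k : Int) - 10)).getD ""
       if c1.1.contains old then bumpB c1.1 need c1.2 old (-1) else c1)
    else c1) with hc2
  have hstep : stepB need l (cnt, matched, answer) ((k : Int), x) =
      (c2.1, c2.2, if 9 ≤ (k : Int) ∧ c2.2 = (need.keys.length : Int) then answer + 1 else answer) := by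
    simp only [stepB, hc1, hc2]
  rw [hstep]
  -- facts about c2
  have hmain : c2.1.keys = need.keys ∧
      (∀ w ∈ need.keys, c2.1.getD w 0 = (wcnt l (k + 1) w : Int)) ∧
      c2.2 = (need.keys.countP (fun w => c2.1.getD w 0 == need.getD w 0) : Int) := by
    by_cases h10 : 10 ≤ k
    · have h10' : 10 ≤ (k : Int) := by exact_mod_cast h10
      have holdlt : k - 10 < l.length := by omega
      have hold : l[k - 10]? = some l[k - 10] := List.getElem?_eq_getElem holdlt
      have hpg : (PySem.List.pyGet? l ((k : Int) - 10)).getD "" = l[k - 10] := by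
        have : (k : Int) - 10 = ((k - 10 : Nat) : Int) := by omega
        rw [this, PySem.List.pyGet?_natCast, hold]
        rfl
      obtain ⟨p2keys, p2get, p2m⟩ := bump_phase need c1.1 c1.2 l[k - 10] (-1) hnd p1keys p1m
      have hc2eq : c2 = (if c1.1.contains l[k - 10] then bumpB c1.1 need c1.2 l[k - 10] (-1) else c1) := by
        rw [hc2, if_pos h10', hpg]
      rw [hc2eq]
      refine ⟨p2keys, ?_, p2m⟩
      intro w hw
      rw [p2get w hw]
      have hbig := wcnt_succ_big l k x l[k - 10] hk hold h10 w
      rcases eq_or_ne w l[k - 10] with h2 | h2 <;> rcases eq_or_ne w x with hwx | hwx <;>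
        [rw [if_pos h2, if_pos hwx] at hbig; rw [if_pos h2, if_neg hwx] at hbig;
         rw [if_neg h2, if_pos hwx] at hbig; rw [if_neg h2, if_neg hwx] at hbig] <;>
        [rw [if_pos h2, p1get w hw, if_pos hwx, hcnt w hw];
         rw [if_pos h2, p1get w hw, if_neg hwx, hcnt w hw];
         rw [if_neg h2, p1get w hw, if_pos hwx, hcnt w hw];
         rw [if_neg h2, p1get w hw, if_neg hwx, hcnt w hw]] <;>
        omega
    · have h10' : ¬ (10 ≤ (k : Int)) := by exact_mod_cast h10
      have hc2eq : c2 = c1 := by rw [hc2, if_neg h10']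
      rw [hc2eq]
      refine ⟨p1keys, ?_, p1m⟩
      intro w hw
      rw [p1get w hw]
      have hsmall := wcnt_succ_small l k x hk (by omega) w
      rcases eq_or_ne w x with hwx | hwx <;>
        [rw [if_pos hwx] at hsmall; rw [if_neg hwx] at hsmall] <;>
        [rw [if_pos hwx, hcnt w hw]; rw [if_neg hwx, hcnt w hw]] <;>
        omega
  obtain ⟨hk2, hg2, hm2⟩ := hmain
  refine ⟨hk2, hg2, hm2, ?_⟩
  -- the answer component
  have hwin : (9 ≤ (k : Int) ∧ c2.2 = (need.keys.length : Int)) ↔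
      (decide (9 ≤ k) && winOK need l (k + 1)) = true := by
    rw [hm2]
    constructor
    · rintro ⟨h9, hlen⟩
      have hcp : need.keys.countP (fun w => c2.1.getD w 0 == need.getD w 0) = need.keys.length := by
        exact_mod_cast hlen
      have hall := List.countP_eq_length.mp hcp
      simp only [Bool.and_eq_true, decide_eq_true_eq]
      refine ⟨by exact_mod_cast h9, ?_⟩
      rw [winOK, List.all_eq_true]
      intro w hw
      have := hall w hw
      simp only [beq_iff_eq] at this ⊢
      rw [← hg2 w hw]
      exact this
    · intro hb
      simp only [Bool.and_eq_true, decide_eq_true_eq] at hb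
      obtain ⟨h9, hwok⟩ := hb
      refine ⟨by exact_mod_cast h9, ?_⟩
      have : ∀ w ∈ need.keys, (fun w => c2.1.getD w 0 == need.getD w 0) w = true := by
        intro w hw
        rw [winOK, List.all_eq_true] at hwok
        have := hwok w hw
        simp only [beq_iff_eq] at this ⊢
        rw [hg2 w hw]
        exact this
      exact_mod_cast congrArg (Nat.cast (R := Int)) (List.countP_eq_length.mpr this)
  dsimp only
  rw [List.range_succ, List.countP_append, hans]
  by_cases hcond : 9 ≤ (k : Int) ∧ c2.2 = (need.keys.length : Int)
  · rw [if_pos hcond]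
    have := hwin.mp hcond
    simp [this]
  · rw [if_neg hcond]
    have : ¬ ((decide (9 ≤ k) && winOK need l (k + 1)) = true) := fun hb => hcond (hwin.mpr hb)
    simp [this]

lemma foldB_inv (need : PySem.Dict String Int) (l : List String) (hnd : need.keys.Nodup) :
    ∀ (suf : List String) (k : Nat) (st : PySem.Dict String Int × Int × Int),
      l.drop k = suf → k ≤ l.length → InvB need l k st →
      InvB need l l.length ((PySem.List.enumerate suf (k : Int)).foldl (stepB need l) st) := by
  intro suf
  induction suf with
  | nil =>
    intro k st hdrop hkle hinv
    have hge : l.length ≤ k := by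
      by_contra hcon
      have := List.drop_eq_nil_iff.mp hdrop
      omega
    have hk : k = l.length := by omega
    subst hk
    simpa [PySem.List.enumerate] using hinv
  | cons x suf ih =>
    intro k st hdrop hkle hinv
    have hlt : k < l.length := by
      have := congrArg List.length hdrop
      simp at this
      omega
    have hx : l[k]? = some x := by
      have h0 : (l.drop k)[0]? = some x := by rw [hdrop]; rfl
      rw [List.getElem?_drop] at h0
      simpa using h0
    have hdrop' : l.drop (k + 1) = suf := by
      rw [← List.drop_drop, hdrop]
      rfl
    rw [PySem.List.enumerate_cons, List.foldl_cons]
    have := ih (k + 1) (stepB need l st ((k : Int), x)) hdrop' (by omega)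
      (stepB_inv need l hnd k x hx st hinv)
    exact_mod_cast this

lemma foldl_insert_zero_getD (l : List String) (d : PySem.Dict String Int) (v : String) :
    (l.foldl (fun d w => d.insert w (0 : Int)) d).getD v 0 = if v ∈ l then 0 else d.getD v 0 := by
  induction l generalizing d with
  | nil => simp
  | cons a t ih =>
    simp only [List.foldl_cons, ih, PySem.Dict.getD_insert, List.mem_cons]
    by_cases hv : v ∈ t <;> by_cases hva : v = a <;> simp [hv, hva]

lemma nodup_keys_need (want : List String) (number : List Int) :
    ((want.zip number).foldl (fun d p => d.insert p.1 p.2) PySem.Dict.empty).keys.Nodup := by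
  have := PySem.Dict.nodup_keys_foldl_insert_key (want.zip number) Prod.fst
    (fun _ p => p.2) (PySem.Dict.empty (κ := String) (ν := Int)) (by simp)
  simpa using this

lemma B_eq_spec (want : List String) (number : List Int) (discount : List String) :
    solution_alt want number discount =
      specCount ((want.zip number).foldl (fun d p => d.insert p.1 p.2) PySem.Dict.empty)
        discount := by
  unfold solution_alt specCount
  set need := (want.zip number).foldl (fun d p => d.insert p.1 p.2) PySem.Dict.empty with hneed
  have hnd : need.keys.Nodup := nodup_keys_need want number
  set cnt0 := need.keys.foldl (fun d w => d.insert w (0 : Int)) PySem.Dict.empty with hcnt0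
  have hkeys0 : cnt0.keys = need.keys := by
    rw [hcnt0]
    have := PySem.Dict.keys_foldl_insert_key need.keys (fun w => w) (fun _ _ => (0 : Int))
      (PySem.Dict.empty (κ := String) (ν := Int))
    simp only [List.map_id'] at this
    rw [this, PySem.Dict.keys_empty]
    have : PySem.Set.update ([] : PySem.Set String) need.keys = PySem.Set.ofList need.keys := rfl
    rw [this, PySem.Set.ofList_eq_self_of_nodup _ hnd]
  have hinv0 : InvB need discount 0 (cnt0, (need.keys.countP (fun w => need.getD w 0 == 0) : Int), 0) := by
    refine ⟨hkeys0, ?_, ?_, by simp⟩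
    · intro w hw
      rw [hcnt0, foldl_insert_zero_getD, if_pos hw]
      simp [wcnt]
    · dsimp only
      congr 1
      apply List.countP_congr
      intro w hw
      rw [hcnt0, foldl_insert_zero_getD, if_pos hw]
      simp only [beq_iff_eq]
      exact eq_comm
  have := foldB_inv need discount hnd discount 0 _ (by simp) (by simp) hinv0
  obtain ⟨-, -, -, hans⟩ := this
  exact_mod_cast hans

lemma foldl_dec {α : Type} (l : List α) (p : α → Prop) [DecidablePred p] :
    ∀ c : Int, l.foldl (fun c w => if p w then c else c - 1) c =
      c - (l.countP (fun w => !decide (p w)) : Int) := by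
  induction l with
  | nil => intro c; simp
  | cons a t ih =>
    intro c
    rw [List.foldl_cons, List.countP_cons]
    by_cases ha : p a
    · rw [if_pos ha, ih]
      simp [ha]
    · rw [if_neg ha, ih]
      simp [ha]
      omega

lemma spec_reindex (need : PySem.Dict String Int) (l : List String) :
    specCount need l = ((List.range (l.length - 9)).countP (fun i => winOK need l (i + 10)) : Int) := by
  unfold specCount
  by_cases h : l.length ≤ 9
  · have h1 : l.length - 9 = 0 := by omega
    rw [h1]
    have h2 : (List.range l.length).countP (fun j => decide (9 ≤ j) && winOK need l (j + 1)) = 0 := by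
      rw [List.countP_eq_zero]
      intro j hj
      have : j < 9 := by
        have := List.mem_range.mp hj
        omega
      simp [Nat.not_le.mpr this]
    simp [h2]
  · rw [Nat.not_le] at h
    have h1 : l.length = 9 + (l.length - 9) := by omega
    rw [h1, List.range_add, List.countP_append, List.countP_map]
    have h2 : (List.range 9).countP (fun j => decide (9 ≤ j) && winOK need l (j + 1)) = 0 := by
      rw [List.countP_eq_zero]
      intro j hj
      have : j < 9 := List.mem_range.mp hj
      simp [Nat.not_le.mpr this]
    rw [h2]
    norm_num
    apply List.countP_congr
    intro i _
    have h9 : 9 ≤ 9 + i := by omega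
    simp only [Function.comp]
    rw [show 9 + i + 1 = i + 10 by omega]
    simp [h9]

lemma fold_range_zip (l1 : List String) (l2 : List Int) :
    ∀ (n : Nat), n ≤ l1.length → n ≤ l2.length → ∀ (d : PySem.Dict String Int),
      (List.range n).foldl
        (fun d k =>
          match l1[k]?, l2[k]? with
          | some w, some m => d.insert w m
          | _, _ => d) d =
      ((l1.zip l2).take n).foldl (fun d p => d.insert p.1 p.2) d := by
  intro n
  induction n with
  | zero => intro _ _ d; simp
  | succ n ih =>
    intro h1 h2 d
    rw [List.range_succ, List.foldl_append, ih (by omega) (by omega),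
      List.take_add_one, List.foldl_append]
    have hz : (l1.zip l2)[n]? = some (l1[n], l2[n]) := by
      rw [List.getElem?_eq_getElem (by simp [List.length_zip]; omega)]
      rw [List.getElem_zip]
      rfl
    rw [hz]
    simp only [List.foldl_cons, List.foldl_nil, Option.toList_some,
      List.getElem?_eq_getElem (show n < l1.length by omega),
      List.getElem?_eq_getElem (show n < l2.length by omega)]
    rfl

lemma dict_eq (want : List String) (number : List Int) (h : want.length ≤ number.length) :
    (PySem.List.pyRange 0 (want.length : Int) 1).foldl
      (fun d idx =>
        match PySem.List.pyGet? want idx, PySem.List.pyGet? number idx with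
        | some w, some n => d.insert w n
        | _, _ => d)
      PySem.Dict.empty =
    (want.zip number).foldl (fun d p => d.insert p.1 p.2) PySem.Dict.empty := by
  rw [PySem.List.pyRange_one, List.foldl_map]
  have hnorm : ((want.length : Int) - 0).toNat = want.length := by omega
  rw [hnorm]
  simp only [zero_add, PySem.List.pyGet?_natCast]
  rw [fold_range_zip want number want.length le_rfl h]
  congr 1
  exact List.take_of_length_le (by simp [List.length_zip])

lemma keys_needDict (want : List String) (number : List Int) (h : want.length ≤ number.length) :
    ((want.zip number).foldl (fun d p => d.insert p.1 p.2) PySem.Dict.empty).keys =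
      PySem.Set.ofList want := by
  have := PySem.Dict.keys_foldl_insert_key (want.zip number) Prod.fst
    (fun _ p => p.2) (PySem.Dict.empty (κ := String) (ν := Int))
  simp only [PySem.Dict.keys_empty] at this
  rw [show (fun (d : PySem.Dict String Int) (p : String × Int) => d.insert p.1 p.2) =
      (fun d p => d.insert p.1 ((fun _ p => p.2) d p)) from rfl, this,
    List.map_fst_zip h]
  rfl

lemma A_eq_spec (want : List String) (number : List Int) (discount : List String)
    (h : want.length ≤ number.length) :
    solution want number discount =
      specCount ((want.zip number).foldl (fun d p => d.insert p.1 p.2) PySem.Dict.empty)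
        discount := by
  unfold solution
  rw [dict_eq want number h]
  set need := (want.zip number).foldl (fun d p => d.insert p.1 p.2) PySem.Dict.empty with hneed
  have hmemkeys : ∀ w, w ∈ need.keys ↔ w ∈ want := by
    intro w
    rw [keys_needDict want number h]
    exact PySem.Set.mem_ofList want w
  rw [spec_reindex]
  by_cases hearly : want.any (fun w => need.getD w 0 > (discount.count w : Int))
  · rw [if_pos hearly]
    obtain ⟨w, hw, hgt⟩ := List.any_eq_true.mp hearly
    rw [decide_eq_true_eq] at hgt
    have hzero : (List.range (discount.length - 9)).countP
        (fun i => winOK need discount (i + 10)) = 0 := by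
      rw [List.countP_eq_zero]
      intro i _
      rw [winOK]
      intro hall
      rw [List.all_eq_true] at hall
      have := hall w ((hmemkeys w).mpr hw)
      rw [beq_iff_eq] at this
      have hle : wcnt discount (i + 10) w ≤ discount.count w := wcnt_le_count discount (i + 10) w
      omega
    rw [hzero]
    rfl
  · rw [if_neg hearly]
    rw [PySem.List.pyRange_one, List.foldl_map]
    have hcast : (((discount.length : Int) - 9) - 0).toNat = discount.length - 9 := by omega
    rw [hcast]
    dsimp only
    rw [PySem.List.foldl_ite_add_one
      (fun (k : Nat) => (want.foldl (fun c w =>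
        if ((PySem.List.slice discount (some ((0 : Int) + (k : Int))) (some ((0 : Int) + (k : Int) + 10))).count w : Int) = need.getD w 0
        then c else c - 1) 0) = 0)
      (List.range (discount.length - 9)) 0, zero_add]
    congr 1
    apply List.countP_congr
    intro i hi
    rw [decide_eq_true_eq, foldl_dec want (fun w => ((PySem.List.slice discount (some ((0 : Int) + (i : Int))) (some ((0 : Int) + (i : Int) + 10))).count w : Int) = need.getD w 0)]
    have hslice : PySem.List.slice discount (some ((0 : Int) + (i : Int))) (some ((0 : Int) + (i : Int) + 10)) =
        (discount.drop i).take 10 := by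
      rw [zero_add, show ((i : Nat) : Int) + 10 = ((i : Nat) : Int) + ((10 : Nat) : Int) by norm_num]
      exact PySem.List.slice_natCast_add discount i 10
    have hwin : ∀ w, wcnt discount (i + 10) w = ((discount.drop i).take 10).count w := by
      intro w
      unfold wcnt
      rw [show i + 10 - 10 = i by omega, List.drop_take]
      congr 2
      omega
    constructor
    · intro hz
      have hcp : want.countP (fun w =>
          !(decide (((PySem.List.slice discount (some ((0 : Int) + (i : Int))) (some ((0 : Int) + (i : Int) + 10))).count w : Int) = need.getD w 0))) = 0 := by
        omega
      rw [List.countP_eq_zero] at hcp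
      rw [winOK, List.all_eq_true]
      intro w hw
      have := hcp w ((hmemkeys w).mp hw)
      simp only [Bool.not_eq_true', decide_eq_false_iff_not, not_not] at this
      rw [hslice] at this
      rw [beq_iff_eq, hwin w]
      exact this
    · intro hwok
      have hcp : want.countP (fun w =>
          !(decide (((PySem.List.slice discount (some ((0 : Int) + (i : Int))) (some ((0 : Int) + (i : Int) + 10))).count w : Int) = need.getD w 0))) = 0 := by
        rw [List.countP_eq_zero]
        intro w hw
        rw [winOK, List.all_eq_true] at hwok
        have := hwok w ((hmemkeys w).mpr hw)
        rw [beq_iff_eq, hwin w] at this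
        simp only [Bool.not_eq_true', decide_eq_false_iff_not, not_not, hslice]
        exact this
      omega

-- ===== VERDICT (by name: the statement is the Claim_ definition above) =====
theorem solution_spec : Claim_equal_solution := by
  intro want number discount _ hpre
  unfold Spec_solution
  rw [A_eq_spec want number discount hpre, B_eq_spec]
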